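-- pv_equiv track=rewrite | github.com/jeongeun0114/python_study | nadocoding/movie.py | what_seat
-- ===== SOURCE A (Python) =====
-- def what_seat(alphabet):
--     seat_list = []
--     '''
--     # 평상시
--     for i in range(1, 21):
--         seat = alphabet + str(i)
--         seat_list.append(seat)
--     '''
--
--     # by COVID 19
--     odd = ["A", "C"]
--     if alphabet in odd:
--         for i in range(1, 11, 2):
--            seat = alphabet + str(i)
--            seat_list.append(seat)
--
--     else:
--         for i in range(2, 11, 2):
--             seat = alphabet + str(i)
--             seat_list.append(seat)
--
--     return seat_list
-- ===== SOURCE B (Python) =====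
-- def what_seat(alphabet):
--     # Recursive back-to-front construction: start from the highest seat number
--     # (9 for odd rows A/C, 10 for even rows) and recurse downward in steps of 2,
--     # assembling the list front-first on the way back up.
--     def build(n):
--         if n <= 0:
--             return []
--         return build(n - 2) + [alphabet + str(n)]
--     return build(9 if alphabet in ("A", "C") else 10)
-- ===== Notes on version B (the rewrite author's own statement) =====
-- stated objective: alternative
-- what changed: Replaces A's two branch-specific ascending stepped-range append loops by a single recursive helper that starts at the top seat number (9 or 10) and recurses downward by 2, assembling the list front-first on the way back up.
import Mathlib
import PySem

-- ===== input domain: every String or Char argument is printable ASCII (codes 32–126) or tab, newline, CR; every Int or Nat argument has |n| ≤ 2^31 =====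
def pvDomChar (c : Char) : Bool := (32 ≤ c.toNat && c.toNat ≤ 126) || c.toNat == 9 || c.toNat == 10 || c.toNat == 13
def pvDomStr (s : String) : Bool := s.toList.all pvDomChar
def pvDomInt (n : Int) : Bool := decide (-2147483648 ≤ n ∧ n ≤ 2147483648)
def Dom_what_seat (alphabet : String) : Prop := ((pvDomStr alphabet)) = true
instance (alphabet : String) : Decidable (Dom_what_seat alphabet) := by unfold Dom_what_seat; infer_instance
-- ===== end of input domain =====

-- B replaces A's two ascending stepped-range append loops by one recursive helper that
-- descends from the top seat number by 2 and assembles the list on the way back up;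
-- objective: alternative decomposition, same results.


-- ===== PORT A =====
-- literal port of A: two branch-specific stepped ranges, foldl-append like Python's append loop
def what_seat (alphabet : String) : List String :=
  let seat_list : List String := []
  let odd : List String := ["A", "C"]
  if odd.contains alphabet then
    (PySem.List.pyRange 1 11 2).foldl
      (fun seat_list i => seat_list ++ [alphabet ++ PySem.Int.toStr i]) seat_list
  else
    (PySem.List.pyRange 2 11 2).foldl
      (fun seat_list i => seat_list ++ [alphabet ++ PySem.Int.toStr i]) seat_list

-- ===== PORT B =====
-- B's recursive helper build(n): [] for n ≤ 0 (the Nat 0/1 base cases cover n-2 ≤ 0),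
-- else build(n-2) ++ [alphabet + str(n)]
def whatSeatBuild (alphabet : String) : Nat → List String
  | 0 => []
  | 1 => [alphabet ++ PySem.Int.toStr 1]
  | (n + 2) => whatSeatBuild alphabet n ++ [alphabet ++ PySem.Int.toStr (n + 2 : Nat)]

def what_seat_alt (alphabet : String) : List String :=
  whatSeatBuild alphabet (if ["A", "C"].contains alphabet then 9 else 10)

-- ===== PRECONDITION & SPEC =====
def Spec_what_seat (alphabet : String) (out : List String) : Prop := out = what_seat_alt alphabet
instance (alphabet : String) (out : List String) : Decidable (Spec_what_seat alphabet out) := by unfold Spec_what_seat; infer_instance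

-- ===== CLAIM (what is proved, stated in full; the proofs are below) =====
def Claim_equal_what_seat : Prop := ∀ (alphabet : String), Dom_what_seat alphabet → Spec_what_seat alphabet (what_seat alphabet)

-- ===== LEMMAS AND PROOFS =====

-- ===== VERDICT (by name: the statement is the Claim_ definition above) =====
theorem what_seat_spec : Claim_equal_what_seat := by
  intro alphabet _
  unfold Spec_what_seat what_seat what_seat_alt
  by_cases h : alphabet = "A" ∨ alphabet = "C"
  · rw [if_pos (by simp [h]), if_pos (by simp [h])]
    simp [whatSeatBuild, PySem.List.pyRange, List.range_succ]
  · rw [if_neg (by simp [h]), if_neg (by simp [h])]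
    simp [whatSeatBuild, PySem.List.pyRange, List.range_succ]
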